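-- pv_equiv track=rewrite | github.com/Prashant-Aswal/Numbers_and_Bases | ChkBase.py | chk12
-- ===== SOURCE A (Python) =====
-- def chk12(num):
--     num = str(num)
--     guide = ['0', '1', '2', '3', '4', '5', '6', '7', '8', '9', 'A', 'a', 'B', 'b']
--     for i in num:
--         if i in guide:
--             continue
--         else:
--             return False
--     return True
-- ===== SOURCE B (Python) =====
-- def chk12(num):
--     s = str(num)
--     return sum(s.count(d) for d in '0123456789AaBb') == len(s)
-- ===== Notes on version B (the rewrite author's own statement) =====
-- stated objective: alternative
-- what changed: Instead of scanning the string character by character with an early return on the first invalid one, B iterates over the 14-letter allowed alphabet, sums the occurrence counts of each allowed digit in the string, and decides validity by the arithmetic test that this total equals the string length (every character accounted for iff all are allowed).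
import Mathlib
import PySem

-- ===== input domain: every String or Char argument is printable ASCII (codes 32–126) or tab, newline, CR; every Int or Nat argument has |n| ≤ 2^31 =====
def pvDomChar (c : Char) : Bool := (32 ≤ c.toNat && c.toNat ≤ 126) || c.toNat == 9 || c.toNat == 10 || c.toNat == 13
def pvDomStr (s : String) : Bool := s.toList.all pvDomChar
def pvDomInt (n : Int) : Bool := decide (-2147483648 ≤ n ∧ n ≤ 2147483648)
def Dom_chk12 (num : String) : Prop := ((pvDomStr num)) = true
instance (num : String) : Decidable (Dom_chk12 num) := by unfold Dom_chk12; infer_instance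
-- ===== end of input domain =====

-- ===== PORT A =====
-- header: B replaces A's per-character scan (early return on first invalid char) by an
-- alphabet-indexed count: the occurrence counts of the 14 allowed digits must sum to len(s).
def chk12Guide : List Char := ['0','1','2','3','4','5','6','7','8','9','A','a','B','b']

def chk12Loop : List Char → Bool
  | [] => true
  | c :: rest => if c ∈ chk12Guide then chk12Loop rest else false

-- str(num) on a string is the identity; 'for i in num' walks the characters
def chk12 (num : String) : Bool := chk12Loop num.toList

-- ===== PORT B =====
-- sum(s.count(d) for d in '0123456789AaBb') == len(s)
def chk12_alt (num : String) : Bool :=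
  (("0123456789AaBb".toList).map (fun d => PySem.Str.count num (String.ofList [d]))).sum
    == PySem.Str.len num

-- ===== PRECONDITION & SPEC =====
def Spec_chk12 (num : String) (out : Bool) : Prop := out = chk12_alt num
instance (num : String) (out : Bool) : Decidable (Spec_chk12 num out) := by unfold Spec_chk12; infer_instance

-- ===== CLAIM =====
def Claim_equal_chk12 : Prop := ∀ (num : String), Dom_chk12 num → Spec_chk12 num (chk12 num)

-- ===== LEMMAS AND PROOFS =====

-- A's loop is an 'all chars in guide' check
theorem chk12_loop_eq_all (l : List Char) : chk12Loop l = l.all (fun c => decide (c ∈ chk12Guide)) := by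
  induction l with
  | nil => rfl
  | cons c rest ih => by_cases h : c ∈ chk12Guide <;> simp [chk12Loop, h, ih]

-- count.go with a single-char needle and enough fuel counts occurrences of that char
theorem chk12_count_go_single (c : Char) (l : List Char) :
    ∀ (fuel acc : Nat), l.length ≤ fuel →
      PySem.Chars.count.go [c] fuel l acc = acc + l.count c := by
  induction l with
  | nil => intro fuel acc _; cases fuel <;> simp [PySem.Chars.count.go]
  | cons x t ih =>
    intro fuel acc hfuel
    cases fuel with
    | zero => simp at hfuel
    | succ n =>
      by_cases h : x = c
      · subst h
        have : [x].isPrefixOf (x :: t) = true := by simp [List.isPrefixOf]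
        simp only [PySem.Chars.count.go, this, if_true]
        rw [show List.drop [x].length (x :: t) = t from rfl,
            ih n (acc + 1) (by simpa using hfuel)]
        simp
        omega
      · have : [c].isPrefixOf (x :: t) = false := by
          simp [List.isPrefixOf]; exact fun hh => absurd hh.symm h
        simp only [PySem.Chars.count.go, this]
        rw [ih n acc (by simpa using hfuel)]
        simp [h]

theorem chk12_count_single (c : Char) (s : List Char) :
    PySem.Chars.count s [c] = s.count c := by
  simp only [PySem.Chars.count, List.isEmpty_cons, if_false, Bool.false_eq_true]
  simpa using chk12_count_go_single c s s.length 0 (le_refl _)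

-- summing per-letter counts over a duplicate-free alphabet counts the chars in it
theorem chk12_sum_ite (x : Char) (g : List Char) :
    (g.map (fun d => if x = d then (1:Nat) else 0)).sum = g.count x := by
  induction g with
  | nil => simp
  | cons y gs ihg =>
    by_cases h : x = y
    · subst h; simp [ihg]; omega
    · simp [h, Ne.symm h, ihg]

theorem chk12_sum_counts (g : List Char) (hg : g.Nodup) (s : List Char) :
    (g.map (fun d => s.count d)).sum = s.countP (fun c => decide (c ∈ g)) := by
  induction s with
  | nil => simp
  | cons x t ih =>
    have hstep : (g.map (fun d => (x :: t).count d)).sum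
        = (g.map (fun d => t.count d)).sum + (g.map (fun d => if x = d then 1 else 0)).sum := by
      rw [← List.sum_map_add]
      apply congrArg
      apply List.map_congr_left
      intro d _
      by_cases h : x = d <;> simp [h]
    rw [hstep, chk12_sum_ite, ih, List.countP_cons]
    by_cases hx : x ∈ g
    · rw [List.count_eq_one_of_mem hg hx]; simp [hx]
    · rw [List.count_eq_zero_of_not_mem hx]; simp [hx]

-- ===== VERDICT =====
theorem chk12_spec : Claim_equal_chk12 := by
  intro num _
  unfold Spec_chk12 chk12 chk12_alt
  rw [chk12_loop_eq_all]
  have hbridge : ∀ d : Char, PySem.Str.count num (String.ofList [d]) = num.toList.count d := by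
    intro d
    rw [PySem.Str.count_eq]
    simpa using chk12_count_single d num.toList
  simp only [hbridge]
  rw [chk12_sum_counts "0123456789AaBb".toList (by decide) num.toList]
  rw [Bool.eq_iff_iff, List.all_eq_true, beq_iff_eq, PySem.Str.len_eq]
  rw [Nat.cast_inj, List.countP_eq_length]
  constructor <;> intro h c hc <;> have := h c hc <;> revert this <;>
    simp [chk12Guide]
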